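-- pv_equiv track=rewrite | github.com/OFFIS-DAI/mango_benchmark | python_files/run_sim.py | container_to_agents
-- ===== SOURCE A (Python) =====
-- import math
--
-- def container_to_agents(config):
--     n_agents = config["number_of_agents"]
--     n_containers = config["number_of_containers"]
--     agents_per_container = math.ceil(n_agents / n_containers)
--     output = []
--
--     for _ in range(n_containers):
--         output.append([])
--
--     for i in range(n_agents):
--         # 0:agents_per_container-1 map to container 0
--         # agents_per_container:2*agents_per_container-1 map to container 1
--         # ...
--         container_id = i // agents_per_container
--         output[container_id].append(i)
--
--     return output
-- ===== SOURCE B (Python) =====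
-- import math
--
-- def container_to_agents(config):
--     n_agents = config["number_of_agents"]
--     n_containers = config["number_of_containers"]
--     apc = math.ceil(n_agents / n_containers)
--     rest = list(range(n_agents))
--     output = []
--     for _ in range(n_containers):
--         output.append(rest[:apc])
--         rest = rest[apc:]
--     return output
-- ===== Notes on version B (the rewrite author's own statement) =====
-- stated objective: alternative
-- what changed: B materializes the flat index list once and consumes it front-to-back, slicing one apc-sized chunk (rest[:apc] / rest[apc:]) off per container, instead of A's pre-allocation of empty buckets followed by a per-agent scatter into bucket i//apc.
import Mathlib
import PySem

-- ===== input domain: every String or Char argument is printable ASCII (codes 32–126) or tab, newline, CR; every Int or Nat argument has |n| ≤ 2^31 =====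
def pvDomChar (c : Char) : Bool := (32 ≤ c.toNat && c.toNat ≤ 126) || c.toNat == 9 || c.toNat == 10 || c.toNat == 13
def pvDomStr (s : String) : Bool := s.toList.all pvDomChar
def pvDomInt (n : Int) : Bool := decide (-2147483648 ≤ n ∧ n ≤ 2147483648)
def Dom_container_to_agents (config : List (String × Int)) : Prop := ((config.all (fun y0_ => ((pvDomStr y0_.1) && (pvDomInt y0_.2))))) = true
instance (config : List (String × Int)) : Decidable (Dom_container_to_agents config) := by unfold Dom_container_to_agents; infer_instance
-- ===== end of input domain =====

-- B replaces A's per-agent scatter (i -> output[i // apc]) by materializing the flat index list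
-- once and consuming it front-to-back, slicing one apc-sized chunk off per container; objective: simpler.

-- ===== PORT A =====
-- math.ceil(n/c) is ported as exact integer ceiling -((-n) // c): for |n|,|c| ≤ 2^31 the float
-- quotient never rounds across an integer, so the float ceil equals the integer ceil on Dom.
-- Key lookups use .getD 0; Pre_ guarantees both keys are present (KeyError otherwise).
def container_to_agents (config : List (String × Int)) : List (List Int) :=
  let n_agents := (PySem.Dict.get? (PySem.Dict.mk config) "number_of_agents").getD 0
  let n_containers := (PySem.Dict.get? (PySem.Dict.mk config) "number_of_containers").getD 0
  let agents_per_container := -(PySem.Int.floordiv (-n_agents) n_containers)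
  let output := (PySem.List.pyRange 0 n_containers 1).foldl
    (fun o _ => o ++ [([] : List Int)]) []
  -- output[container_id].append(i): inside Pre_ the index i // apc is nonnegative and in range
  (PySem.List.pyRange 0 n_agents 1).foldl
    (fun o i => o.modify (PySem.Int.floordiv i agents_per_container).toNat (fun l => l ++ [i]))
    output

-- ===== PORT B =====
def container_to_agents_alt (config : List (String × Int)) : List (List Int) :=
  let n_agents := (PySem.Dict.get? (PySem.Dict.mk config) "number_of_agents").getD 0
  let n_containers := (PySem.Dict.get? (PySem.Dict.mk config) "number_of_containers").getD 0
  let apc := -(PySem.Int.floordiv (-n_agents) n_containers)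
  -- state (output, rest): append rest[:apc], keep rest[apc:]
  ((PySem.List.pyRange 0 n_containers 1).foldl
    (fun (st : List (List Int) × List Int) _ =>
      (st.1 ++ [PySem.List.slice st.2 none (some apc)],
       PySem.List.slice st.2 (some apc) none))
    ([], PySem.List.pyRange 0 n_agents 1)).1

-- ===== PRECONDITION & SPEC =====
-- Pre_ excludes exactly the inputs where A raises: a missing key (KeyError),
-- n_containers = 0 (ZeroDivisionError in math.ceil), and n_containers < 0 with
-- n_agents > 0 (IndexError in the scatter loop).
def Pre_container_to_agents (config : List (String × Int)) : Prop :=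
  (PySem.Dict.get? (PySem.Dict.mk config) "number_of_agents") ≠ none ∧
  (PySem.Dict.get? (PySem.Dict.mk config) "number_of_containers") ≠ none ∧
  (PySem.Dict.get? (PySem.Dict.mk config) "number_of_containers").getD 0 ≠ 0 ∧
  (0 < (PySem.Dict.get? (PySem.Dict.mk config) "number_of_containers").getD 0 ∨
    (PySem.Dict.get? (PySem.Dict.mk config) "number_of_agents").getD 0 ≤ 0)
instance (config : List (String × Int)) : Decidable (Pre_container_to_agents config) := by
  unfold Pre_container_to_agents; infer_instance

def pvWitness_container_to_agents : (List (String × Int)) :=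
  [("number_of_agents", 7), ("number_of_containers", 3)]

def Spec_container_to_agents (config : List (String × Int)) (out : List (List Int)) : Prop :=
  out = container_to_agents_alt config
instance (config : List (String × Int)) (out : List (List Int)) : Decidable (Spec_container_to_agents config out) := by
  unfold Spec_container_to_agents; infer_instance

-- ===== CLAIM (what is proved, stated in full; the proofs are below) =====
def Claim_equal_container_to_agents : Prop := ∀ (config : List (String × Int)), Dom_container_to_agents config → Pre_container_to_agents config → Spec_container_to_agents config (container_to_agents config)

-- ===== LEMMAS AND PROOFS =====

-- the bucket picture: container k holds the indices in [k*apc, min((k+1)*apc, m))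
def pvBuckets (apc m c : Int) : List (List Int) :=
  (PySem.List.pyRange 0 c 1).map
    (fun k => PySem.List.pyRange (k * apc) (min ((k + 1) * apc) m) 1)

lemma pvBuckets_length (apc m c : Int) : (pvBuckets apc m c).length = c.toNat := by
  simp [pvBuckets, PySem.List.length_pyRange_one]

-- one step of A's scatter loop advances the bucket picture from m to m+1
lemma pvBuckets_step (apc m c : Int) (hapc : 0 < apc) (hm : 0 ≤ m) (_hmc : m < apc * c) :
    (pvBuckets apc m c).modify (PySem.Int.floordiv m apc).toNat (fun l => l ++ [m])
      = pvBuckets apc (m + 1) c := by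
  have hdiv : (PySem.Int.floordiv m apc) * apc ≤ m ∧ m < (PySem.Int.floordiv m apc + 1) * apc :=
    (PySem.Int.floordiv_eq_iff_of_pos hapc).1 rfl
  have hj0 : 0 ≤ PySem.Int.floordiv m apc := by nlinarith [hdiv.1, hdiv.2]
  apply List.ext_getElem
  · simp [pvBuckets, PySem.List.length_pyRange_one]
  intro k hk hk'
  have hkc : (k : Int) < c := by
    have := hk'
    simp [pvBuckets, PySem.List.length_pyRange_one] at this
    omega
  have hbk : ∀ M : Int, k < (pvBuckets apc M c).length := by
    intro M; rw [pvBuckets_length]; omega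
  have hget : ∀ M : Int, (pvBuckets apc M c)[k]'(hbk M)
      = PySem.List.pyRange ((k : Int) * apc) (min (((k : Int) + 1) * apc) M) 1 := by
    intro M
    simp [pvBuckets, PySem.List.getElem_pyRange_one]
  rw [List.getElem_modify, hget, hget]
  by_cases hkj : (PySem.Int.floordiv m apc).toNat = k
  · have hjk : PySem.Int.floordiv m apc = (k : Int) := by omega
    rw [if_pos hkj]
    rw [hjk] at hdiv
    have h1 : min (((k : Int) + 1) * apc) m = m := by omega
    have h2 : min (((k : Int) + 1) * apc) (m + 1) = m + 1 := by omega
    rw [h1, h2, PySem.List.pyRange_one_succ_right hdiv.1]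
  · rw [if_neg hkj]
    have hne : PySem.Int.floordiv m apc ≠ (k : Int) := by omega
    rcases lt_or_gt_of_ne hne with hlt | hgt
    · -- j < k : both buckets are empty (m < (j+1)*apc ≤ k*apc)
      have hstart : m + 1 ≤ (k : Int) * apc := by nlinarith [hdiv.2]
      rw [PySem.List.pyRange_one_eq_nil (by omega), PySem.List.pyRange_one_eq_nil (by omega)]
    · -- j > k : the bucket is already full ((k+1)*apc ≤ j*apc ≤ m)
      have hfull : ((k : Int) + 1) * apc ≤ m := by nlinarith [hdiv.1]
      have h1 : min (((k : Int) + 1) * apc) m = ((k : Int) + 1) * apc := by omega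
      have h2 : min (((k : Int) + 1) * apc) (m + 1) = ((k : Int) + 1) * apc := by omega
      rw [h1, h2]

-- A's scatter loop carries the bucket picture from m to n
lemma pvBuckets_fold (apc c : Int) (hapc : 0 < apc) (n : Int) (hn : n ≤ apc * c) :
    ∀ (d : Nat) (m : Int), 0 ≤ m → m ≤ n → (n - m).toNat = d →
    (PySem.List.pyRange m n 1).foldl
      (fun o i => o.modify (PySem.Int.floordiv i apc).toNat (fun l => l ++ [i]))
      (pvBuckets apc m c) = pvBuckets apc n c := by
  intro d
  induction d with
  | zero =>
    intro m hm0 hmn hd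
    have hEq : m = n := by omega
    rw [hEq, PySem.List.pyRange_one_eq_nil le_rfl]
    rfl
  | succ d ih =>
    intro m hm0 hmn hd
    have hmlt : m < n := by omega
    rw [PySem.List.pyRange_one_cons hmlt, List.foldl_cons,
        pvBuckets_step apc m c hapc hm0 (by omega)]
    exact ih (m + 1) (by omega) (by omega) (by omega)

-- the core fact about A's two loops: they build the bucket picture
lemma pv_core (n c : Int) (hc : c ≠ 0) (h : 0 < c ∨ n ≤ 0) :
    (PySem.List.pyRange 0 n 1).foldl
      (fun o i => o.modify (PySem.Int.floordiv i (-(PySem.Int.floordiv (-n) c))).toNat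
        (fun l => l ++ [i]))
      ((PySem.List.pyRange 0 c 1).foldl (fun o _ => o ++ [([] : List Int)]) [])
      = pvBuckets (-(PySem.Int.floordiv (-n) c)) n c := by
  set apc : Int := -(PySem.Int.floordiv (-n) c) with hapc_def
  have hinit : (PySem.List.pyRange 0 c 1).foldl (fun o _ => o ++ [([] : List Int)]) []
      = (PySem.List.pyRange 0 c 1).map (fun _ => ([] : List Int)) := by
    simp
  by_cases hn : 0 < n
  · -- n > 0, hence c > 0 and apc ≥ 1 with n ≤ apc * c
    have hcpos : 0 < c := by omega
    have hdiv : (apc - 1) * c < n ∧ n ≤ apc * c :=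
      (PySem.Int.neg_floordiv_neg_eq_iff_of_pos hcpos).1 rfl
    have hapc : 0 < apc := by nlinarith [hdiv.1, hdiv.2]
    have hinit' : (PySem.List.pyRange 0 c 1).map (fun _ => ([] : List Int))
        = pvBuckets apc 0 c := by
      unfold pvBuckets
      apply List.map_congr_left
      intro k hk
      have hk0 : 0 ≤ k := (PySem.List.mem_pyRange_one.1 hk).1
      have hmin := min_le_right ((k + 1) * apc) (0 : Int)
      rw [PySem.List.pyRange_one_eq_nil (by nlinarith)]
    rw [hinit, hinit']
    exact pvBuckets_fold apc c hapc n hdiv.2 (n - 0).toNat 0 le_rfl (by omega) rfl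
  · -- n ≤ 0 : the scatter loop is empty and every bucket range is empty
    have hn' : n ≤ 0 := by omega
    rw [PySem.List.pyRange_one_eq_nil hn', List.foldl_nil, hinit]
    unfold pvBuckets
    apply List.map_congr_left
    intro k hk
    have hk0 : 0 ≤ k := (PySem.List.mem_pyRange_one.1 hk).1
    have hmm := PySem.Int.floordiv_mul_add_mod (-n) c
    rcases lt_or_gt_of_ne hc with hcneg | hcpos
    · have hb := PySem.Int.mod_neg_bounds (-n) hcneg
      have hq : PySem.Int.floordiv (-n) c ≤ 0 := by nlinarith
      have happos : 0 ≤ apc := by omega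
      have hmin := min_le_right ((k + 1) * apc) n
      have hka : 0 ≤ k * apc := mul_nonneg hk0 happos
      rw [PySem.List.pyRange_one_eq_nil (by omega)]
    · have hb0 := PySem.Int.mod_nonneg (-n) hcpos
      have hb1 := PySem.Int.mod_lt (-n) hcpos
      have hq : 0 ≤ PySem.Int.floordiv (-n) c := by nlinarith
      have hapneg : apc ≤ 0 := by omega
      have hle : (k + 1) * apc ≤ k * apc := by nlinarith
      have hmin := min_le_left ((k + 1) * apc) n
      rw [PySem.List.pyRange_one_eq_nil (by omega)]

-- ----- B side -----

-- a fold whose body ignores the list element is an iteration of the body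
lemma pv_foldl_ignore {α β : Type} (g : β → β) :
    ∀ (l : List α) (init : β), l.foldl (fun s _ => g s) init = g^[l.length] init := by
  intro l
  induction l with
  | nil => intro init; rfl
  | cons x xs ih =>
    intro init
    simp [List.foldl_cons, ih, Function.iterate_succ_apply]

-- slicing an apc-chunk off the front of pyRange m n
lemma pv_chunk (apc m n : Int) (hapc : 0 < apc) (_hm : 0 ≤ m) (hmn : m ≤ n) :
    (PySem.List.pyRange m n 1).take apc.toNat
        = PySem.List.pyRange m (min (m + apc) n) 1 ∧
    (PySem.List.pyRange m n 1).drop apc.toNat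
        = PySem.List.pyRange (min (m + apc) n) n 1 := by
  have hmid1 : m ≤ min (m + apc) n := by omega
  have hmid2 : min (m + apc) n ≤ n := by omega
  rw [PySem.List.pyRange_one_append m (min (m + apc) n) n hmid1 hmid2]
  have hlen : (PySem.List.pyRange m (min (m + apc) n) 1).length = (min (m + apc) n - m).toNat :=
    PySem.List.length_pyRange_one _ _
  have hlen_le : (PySem.List.pyRange m (min (m + apc) n) 1).length ≤ apc.toNat := by
    rw [hlen]; omega
  constructor
  · rw [List.take_append, List.take_of_length_le hlen_le]
    by_cases hle : m + apc ≤ n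
    · have : min (m + apc) n = m + apc := by omega
      rw [hlen]
      have : apc.toNat - (min (m + apc) n - m).toNat = 0 := by omega
      rw [this, List.take_zero, List.append_nil]
    · have hmin : min (m + apc) n = n := by omega
      rw [hmin, PySem.List.pyRange_one_eq_nil le_rfl]
      simp
  · rw [List.drop_append, List.drop_of_length_le hlen_le]
    by_cases hle : m + apc ≤ n
    · rw [hlen]
      have : apc.toNat - (min (m + apc) n - m).toNat = 0 := by omega
      rw [this, List.drop_zero, List.nil_append]
    · have hmin : min (m + apc) n = n := by omega
      rw [hmin, PySem.List.pyRange_one_eq_nil le_rfl]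
      simp

-- B's chunk step, iterated N times from position m, emits the buckets of [m, n) (apc > 0)
lemma pv_chunk_iter (apc n : Int) (hapc : 0 < apc) :
    ∀ (N : Nat) (acc : List (List Int)) (m : Int), 0 ≤ m → m ≤ n →
    ((fun (st : List (List Int) × List Int) =>
        (st.1 ++ [PySem.List.slice st.2 none (some apc)],
         PySem.List.slice st.2 (some apc) none))^[N] (acc, PySem.List.pyRange m n 1)).1
      = acc ++ (List.range N).map
          (fun (k : Nat) => PySem.List.pyRange (min (m + (k : Int) * apc) n)
            (min (m + ((k : Int) + 1) * apc) n) 1) := by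
  intro N
  induction N with
  | zero => intro acc m hm hmn; simp
  | succ N ih =>
    intro acc m hm hmn
    rw [Function.iterate_succ_apply]
    have hch := pv_chunk apc m n hapc hm hmn
    have hsl1 : PySem.List.slice (PySem.List.pyRange m n 1) none (some apc)
        = PySem.List.pyRange m (min (m + apc) n) 1 := by
      rw [PySem.List.slice_to _ (le_of_lt hapc), hch.1]
    have hsl2 : PySem.List.slice (PySem.List.pyRange m n 1) (some apc) none
        = PySem.List.pyRange (min (m + apc) n) n 1 := by
      rw [PySem.List.slice_from _ (le_of_lt hapc), hch.2]
    simp only [hsl1, hsl2]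
    rw [ih (acc ++ [PySem.List.pyRange m (min (m + apc) n) 1]) (min (m + apc) n)
          (by omega) (by omega)]
    rw [List.range_succ_eq_map, List.map_cons, List.map_map, List.append_assoc]
    congr 1
    rw [List.singleton_append]
    congr 1
    · push_cast
      simp [zero_mul, add_zero, one_mul, min_eq_left hmn]
    · apply List.map_congr_left
      intro k _
      simp only [Function.comp_apply, Nat.succ_eq_add_one, Nat.cast_add, Nat.cast_one]
      have ekk : ((k : Int) + 1) * apc = (k : Int) * apc + apc := by ring
      have ekk2 : ((k : Int) + 1 + 1) * apc = (k : Int) * apc + apc + apc := by ring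
      have hk0 : (0 : Int) ≤ (k : Int) * apc := by positivity
      by_cases hle : m + apc ≤ n
      · have hmin : min (m + apc) n = m + apc := by omega
        rw [hmin]
        congr 1 <;> omega
      · have hmin : min (m + apc) n = n := by omega
        rw [hmin]
        rw [PySem.List.pyRange_one_eq_nil (by omega), PySem.List.pyRange_one_eq_nil (by omega)]

-- B's fold equals the bucket picture
lemma pv_alt_core (n c : Int) (hc : c ≠ 0) (h : 0 < c ∨ n ≤ 0) :
    ((PySem.List.pyRange 0 c 1).foldl
      (fun (st : List (List Int) × List Int) _ =>
        (st.1 ++ [PySem.List.slice st.2 none (some (-(PySem.Int.floordiv (-n) c)))],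
         PySem.List.slice st.2 (some (-(PySem.Int.floordiv (-n) c))) none))
      ([], PySem.List.pyRange 0 n 1)).1
      = pvBuckets (-(PySem.Int.floordiv (-n) c)) n c := by
  set apc : Int := -(PySem.Int.floordiv (-n) c) with hapc_def
  rw [pv_foldl_ignore]
  rw [PySem.List.length_pyRange_one]
  by_cases hn : 0 < n
  · have hcpos : 0 < c := by omega
    have hdiv : (apc - 1) * c < n ∧ n ≤ apc * c :=
      (PySem.Int.neg_floordiv_neg_eq_iff_of_pos hcpos).1 rfl
    have hapc : 0 < apc := by nlinarith [hdiv.1, hdiv.2]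
    rw [pv_chunk_iter apc n hapc (c - 0).toNat [] 0 le_rfl (le_of_lt hn)]
    unfold pvBuckets
    rw [PySem.List.pyRange_one, List.map_map]
    simp only [sub_zero, List.nil_append]
    apply List.map_congr_left
    intro k hk
    simp only [Function.comp]
    have e0 : ((0 : Int) + (k : Int)) * apc = (k : Int) * apc := by ring
    have e1 : ((0 : Int) + (k : Int) + 1) * apc = ((k : Int) + 1) * apc := by ring
    have e2 : ((k : Int) + 1) * apc = (k : Int) * apc + apc := by ring
    have hk0 : (0 : Int) ≤ (k : Int) * apc := by positivity
    by_cases hle : (k : Int) * apc ≤ n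
    · congr 1 <;> omega
    · rw [PySem.List.pyRange_one_eq_nil (by omega),
          PySem.List.pyRange_one_eq_nil (by omega)]
  · -- n ≤ 0 : rest is empty from the start, every chunk and every bucket is empty
    have hn' : n ≤ 0 := by omega
    have hrest : PySem.List.pyRange 0 n 1 = [] := PySem.List.pyRange_one_eq_nil hn'
    rw [hrest]
    have hiter : ∀ (N : Nat) (acc : List (List Int)),
        ((fun (st : List (List Int) × List Int) =>
            (st.1 ++ [PySem.List.slice st.2 none (some apc)],
             PySem.List.slice st.2 (some apc) none))^[N] (acc, ([] : List Int))).1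
          = acc ++ List.replicate N ([] : List Int) := by
      intro N
      induction N with
      | zero => intro acc; simp
      | succ N ih =>
        intro acc
        rw [Function.iterate_succ_apply]
        have hsl1 : PySem.List.slice ([] : List Int) none (some apc) = [] := by
          simp [PySem.List.slice]
        have hsl2 : PySem.List.slice ([] : List Int) (some apc) none = [] := by
          simp [PySem.List.slice]
        simp only [hsl1, hsl2]
        rw [ih (acc ++ [([] : List Int)])]
        rw [List.replicate_succ, List.append_assoc]
        rfl
    rw [hiter]
    unfold pvBuckets
    rw [List.nil_append]
    symm
    rw [List.eq_replicate_iff]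
    refine ⟨by simp [PySem.List.length_pyRange_one], ?_⟩
    intro b hb
    rw [List.mem_map] at hb
    obtain ⟨k, hk, hbk⟩ := hb
    have hk0 : 0 ≤ k := (PySem.List.mem_pyRange_one.1 hk).1
    have hmm := PySem.Int.floordiv_mul_add_mod (-n) c
    subst hbk
    rcases lt_or_gt_of_ne hc with hcneg | hcpos
    · have hb' := PySem.Int.mod_neg_bounds (-n) hcneg
      have hq : PySem.Int.floordiv (-n) c ≤ 0 := by nlinarith
      have happos : 0 ≤ apc := by omega
      have hmin := min_le_right ((k + 1) * apc) n
      have hka : 0 ≤ k * apc := mul_nonneg hk0 happos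
      rw [PySem.List.pyRange_one_eq_nil (by omega)]
    · have hb0 := PySem.Int.mod_nonneg (-n) hcpos
      have hb1 := PySem.Int.mod_lt (-n) hcpos
      have hq : 0 ≤ PySem.Int.floordiv (-n) c := by nlinarith
      have hapneg : apc ≤ 0 := by omega
      have hle : (k + 1) * apc ≤ k * apc := by nlinarith
      have hmin := min_le_left ((k + 1) * apc) n
      rw [PySem.List.pyRange_one_eq_nil (by omega)]

-- ===== VERDICT (by name: the statement is the Claim_ definition above) =====
theorem container_to_agents_spec : Claim_equal_container_to_agents := by
  intro config _ hpre
  obtain ⟨-, -, hc, hor⟩ := hpre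
  unfold Spec_container_to_agents container_to_agents container_to_agents_alt
  rw [pv_core _ _ hc hor, pv_alt_core _ _ hc hor]
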